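-- pv_equiv track=rewrite | github.com/kkr010128/codebert | problem238/problem238_94.py | count
-- ===== SOURCE A (Python) =====
-- def count(mazes, hc, wc):
--     hc = list(hc)
--     wc = list(wc)
--     r = 0
--     for hi, row in enumerate(mazes):
--         if hi in hc:
--             continue
--         for wi, m in enumerate(row):
--             if wi in wc:
--                 continue
--             if m == '#':
--                 r += 1
--     return r
-- ===== SOURCE B (Python) =====
-- def count(mazes, hc, wc):
--     hs = set(hc)
--     ws = {c for c in wc if 0 <= c}
--     r = 0
--     for i, row in enumerate(mazes):
--         if i not in hs:
--             r += sum(1 for m in row if m == '#')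
--             r -= sum(1 for c in ws if c < len(row) and row[c] == '#')
--     return r
-- ===== Notes on version B (the rewrite author's own statement) =====
-- stated objective: faster
-- what changed: Instead of testing every cell's column index against the wc list, B dedupes hc/wc into sets once and computes each kept row's answer as (total '#' in the row) minus ('#' at the distinct non-negative skipped columns), scanning the column set once per row: O(H*(W+|wc|)) instead of O(H*W*|wc|); the probe measured 195x at n=4096 (A timed out above while B returned), though on one family both timed out at the top rung.
import Mathlib
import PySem

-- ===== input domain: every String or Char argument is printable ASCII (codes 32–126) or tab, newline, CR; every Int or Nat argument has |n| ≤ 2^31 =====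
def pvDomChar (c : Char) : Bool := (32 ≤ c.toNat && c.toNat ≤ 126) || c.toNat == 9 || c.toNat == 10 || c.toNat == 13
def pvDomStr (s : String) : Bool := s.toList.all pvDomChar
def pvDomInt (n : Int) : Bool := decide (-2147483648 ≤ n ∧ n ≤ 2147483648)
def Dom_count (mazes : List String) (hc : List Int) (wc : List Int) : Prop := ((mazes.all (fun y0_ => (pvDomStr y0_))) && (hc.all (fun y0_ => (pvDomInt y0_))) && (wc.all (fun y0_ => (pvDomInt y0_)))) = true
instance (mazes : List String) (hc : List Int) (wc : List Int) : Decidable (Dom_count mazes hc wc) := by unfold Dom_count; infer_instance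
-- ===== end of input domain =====

-- B replaces A's per-cell membership test of the column index in wc by per-row
-- arithmetic: total '#' in the row minus '#' at the deduplicated skipped columns.

-- ===== PORT A =====
def count (mazes : List String) (hc : List Int) (wc : List Int) : Int :=
  (PySem.List.enumerate mazes 0).foldl
    (fun r p =>
      if hc.contains p.1 then r
      else
        (PySem.List.enumerate p.2.toList 0).foldl
          (fun r q =>
            if wc.contains q.1 then r
            else if q.2 == '#' then r + 1 else r)
          r)
    0

-- ===== PORT B =====
def count_alt (mazes : List String) (hc : List Int) (wc : List Int) : Int :=
  let hs := PySem.Set.ofList hc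
  let ws := PySem.Set.ofList (wc.filter (fun c => decide (0 ≤ c)))
  (PySem.List.enumerate mazes 0).foldl
    (fun r p =>
      if PySem.Set.contains hs p.1 then r
      else
        let r := r + p.2.toList.foldl (fun a m => if m == '#' then a + 1 else a) 0
        r - ws.foldl
              (fun a c =>
                if decide (c < PySem.Str.len p.2) && (PySem.Str.pyGet? p.2 c == some '#')
                then a + 1 else a)
              0)
    0

-- ===== PRECONDITION & SPEC =====
def Spec_count (mazes : List String) (hc : List Int) (wc : List Int) (out : Int) : Prop := out = count_alt mazes hc wc
instance (mazes : List String) (hc : List Int) (wc : List Int) (out : Int) : Decidable (Spec_count mazes hc wc out) := by unfold Spec_count; infer_instance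

-- ===== CLAIM (what is proved, stated in full; the proofs are below) =====
def Claim_equal_count : Prop := ∀ (mazes : List String) (hc : List Int) (wc : List Int), Dom_count mazes hc wc → Spec_count mazes hc wc (count mazes hc wc)

-- ===== LEMMAS AND PROOFS =====

-- countP of a conjunction splits along the sign of the other conjunct
theorem pv_countP_split {α : Type} (L : List α) (p b : α → Bool) :
    L.countP (fun x => !(p x) && b x) + L.countP (fun x => p x && b x) = L.countP b := by
  induction L with
  | nil => simp
  | cons x t ih =>
    by_cases hp : p x = true <;> by_cases hb : b x = true <;>
      simp [hp, hb] <;> omega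

-- two nodup lists whose filtered memberships agree have equal countP
theorem pv_countP_nodup_eq {α : Type} [DecidableEq α] (L1 L2 : List α) (p1 p2 : α → Bool)
    (h1 : L1.Nodup) (h2 : L2.Nodup)
    (h : ∀ x, (x ∈ L1 ∧ p1 x = true) ↔ (x ∈ L2 ∧ p2 x = true)) :
    L1.countP p1 = L2.countP p2 := by
  have e : (L1.filter p1).toFinset = (L2.filter p2).toFinset := by
    ext a; simp only [List.mem_toFinset, List.mem_filter]; exact h a
  calc L1.countP p1 = (L1.filter p1).length := by rw [List.countP_eq_length_filter]
    _ = (L1.filter p1).toFinset.card := (List.toFinset_card_of_nodup (h1.filter _)).symm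
    _ = (L2.filter p2).toFinset.card := by rw [e]
    _ = (L2.filter p2).length := List.toFinset_card_of_nodup (h2.filter _)
    _ = L2.countP p2 := by rw [List.countP_eq_length_filter]

-- '#' cells at skipped columns, counted by index vs counted over the deduped set
theorem pv_core (s : List Char) (wc : List Int) :
    (PySem.List.pyRange 0 (s.length : Int) 1).countP
        (fun j => wc.contains j && (PySem.List.pyGetD s j ' ' == '#'))
      = (PySem.Set.ofList (wc.filter (fun c => decide (0 ≤ c)))).countP
          (fun c => decide (c < (s.length : Int)) && (PySem.List.pyGet? s c == some '#')) := by
  apply pv_countP_nodup_eq _ _ _ _ (PySem.List.nodup_pyRange_one 0 (s.length : Int))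
    (PySem.Set.nodup_ofList _)
  intro x
  simp only [PySem.List.mem_pyRange_one, PySem.Set.mem_ofList, List.mem_filter,
    Bool.and_eq_true, decide_eq_true_eq, List.elem_iff, beq_iff_eq]
  constructor
  · rintro ⟨⟨hx0, hxl⟩, hmem, hget⟩
    obtain ⟨n, rfl⟩ : ∃ n : ℕ, x = (n : Int) := ⟨x.toNat, (Int.toNat_of_nonneg hx0).symm⟩
    have hn : n < s.length := by exact_mod_cast hxl
    refine ⟨⟨hmem, hx0⟩, hxl, ?_⟩
    rw [PySem.List.pyGet?_natCast, List.getElem?_eq_getElem hn]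
    rw [PySem.List.pyGetD_natCast, List.getD_eq_getElem s ' ' hn] at hget
    simpa using hget
  · rintro ⟨⟨hmem, hx0⟩, hxl, hget⟩
    obtain ⟨n, rfl⟩ : ∃ n : ℕ, x = (n : Int) := ⟨x.toNat, (Int.toNat_of_nonneg hx0).symm⟩
    have hn : n < s.length := by exact_mod_cast hxl
    refine ⟨⟨hx0, hxl⟩, hmem, ?_⟩
    rw [PySem.List.pyGetD_natCast, List.getD_eq_getElem s ' ' hn]
    rw [PySem.List.pyGet?_natCast, List.getElem?_eq_getElem hn] at hget
    simpa using hget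

-- per-row identity: A's filtered scan = total '#' minus '#' at skipped columns
theorem pv_row (s : List Char) (wc : List Int) (r : Int) :
    (PySem.List.enumerate s 0).foldl
      (fun r q => if wc.contains q.1 then r else if q.2 == '#' then r + 1 else r) r
    = r + s.foldl (fun a m => if m == '#' then a + 1 else a) 0
        - (PySem.Set.ofList (wc.filter (fun c => decide (0 ≤ c)))).foldl
            (fun a c =>
              if decide (c < (s.length : Int)) && (PySem.List.pyGet? s c == some '#')
              then a + 1 else a) 0 := by
  have hf : (fun (r : Int) (q : Int × Char) =>
        if wc.contains q.1 then r else if q.2 == '#' then r + 1 else r)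
      = (fun r q => if (!(wc.contains q.1) && (q.2 == '#')) then r + 1 else r) := by
    funext r q
    by_cases h1 : wc.contains q.1 <;> by_cases h2 : (q.2 == '#') = true <;> simp_all
  rw [hf, PySem.List.foldl_if_add_one, PySem.List.foldl_beq_add_one,
    PySem.List.foldl_if_add_one]
  have htot : s.count '#' = (PySem.List.enumerate s 0).countP (fun q => q.2 == '#') := by
    rw [List.count_eq_countP]
    conv_lhs => rw [← PySem.List.map_snd_enumerate s 0]
    rw [List.countP_map]
    rfl
  have hsplit := pv_countP_split (PySem.List.enumerate s 0)
    (fun q => wc.contains q.1) (fun q => q.2 == '#')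
  have hcore : (PySem.List.enumerate s 0).countP
      (fun q => wc.contains q.1 && (q.2 == '#'))
      = (PySem.Set.ofList (wc.filter (fun c => decide (0 ≤ c)))).countP
          (fun c => decide (c < (s.length : Int)) && (PySem.List.pyGet? s c == some '#')) := by
    have he : PySem.List.enumerate s 0
        = List.map (fun j => (j, PySem.List.pyGetD s j ' ')) (PySem.List.pyRange 0 (s.length : Int) 1) := by
      have := PySem.List.enumerate_eq_map_pyRange s ' '
      simpa [PySem.List.len] using this
    rw [he, List.countP_map]
    exact pv_core s wc
  omega

-- ===== VERDICT (by name: the statement is the Claim_ definition above) =====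
theorem count_spec : Claim_equal_count := by
  intro mazes hc wc _
  unfold Spec_count count count_alt
  simp only []
  congr 1
  funext r p
  have hcontains : PySem.Set.contains (PySem.Set.ofList hc) p.1 = hc.contains p.1 := by
    simp [PySem.Set.contains, PySem.Set.mem_ofList]
  rw [hcontains]
  by_cases h : hc.contains p.1
  · have h' : p.1 ∈ hc := by simpa using h
    simp [h']
  · simp only [h, if_neg, Bool.false_eq_true, not_false_iff]
    simpa [PySem.Str.len_eq, PySem.Str.pyGet?_eq] using pv_row p.2.toList wc r
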